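-- pv_equiv track=rewrite | github.com/krzysztof-turowski/string-algorithms | string_indexing/sl_suffix_array.py | _calc_category_dist
-- ===== SOURCE A (Python) =====
-- def _calc_category_dist(SL, category):
--   i = next(i for i, x in enumerate(SL[1:], 1) if x == category)
--   categDist, dist_from_last = [-1] + [0] * i, 0
--   while i < len(SL)-1:
--     if SL[i] == category:
--       dist_from_last = 0
--     dist_from_last += 1
--     i += 1
--     categDist.append(dist_from_last)
--   return categDist
-- ===== SOURCE B (Python) =====
-- def _calc_category_dist(SL, category):
--     occ = [k for k, x in enumerate(SL) if k >= 1 and x == category]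
--     first = next(iter(occ))
--     res = [-1] + [0] * first
--     p = 0
--     for k in range(first + 1, len(SL)):
--         while p + 1 < len(occ) and occ[p + 1] < k:
--             p += 1
--         res.append(k - occ[p])
--     return res
-- ===== Notes on version B (the rewrite author's own statement) =====
-- stated objective: alternative
-- what changed: Replaces A's reset-and-increment running counter with a precomputed list of occurrence indices walked by a pointer, emitting each distance as index-minus-table-entry.
import Mathlib
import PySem

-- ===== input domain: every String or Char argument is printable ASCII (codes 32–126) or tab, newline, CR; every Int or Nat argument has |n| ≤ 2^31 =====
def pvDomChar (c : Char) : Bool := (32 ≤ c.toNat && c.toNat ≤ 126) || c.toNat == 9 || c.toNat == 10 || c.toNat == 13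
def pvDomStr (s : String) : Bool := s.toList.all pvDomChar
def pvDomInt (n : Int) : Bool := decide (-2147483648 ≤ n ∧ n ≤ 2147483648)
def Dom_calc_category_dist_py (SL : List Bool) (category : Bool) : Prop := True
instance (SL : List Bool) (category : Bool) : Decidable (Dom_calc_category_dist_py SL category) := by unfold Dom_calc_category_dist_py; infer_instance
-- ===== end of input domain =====

-- B replaces A's reset-and-increment running counter by a precomputed table of occurrence
-- indices walked with a pointer (alternative decomposition, same O(n) cost).

-- ===== PORT A =====
-- i = next(i for i, x in enumerate(SL[1:], 1) if x == category)  (none = StopIteration)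
def pvFirstA (l : List Bool) (c : Bool) (s : Nat) : Option Nat :=
  match l with
  | [] => none
  | x :: xs => if x == c then some s else pvFirstA xs c (s + 1)

-- the while loop; fuel = len(SL)-1-i iterations, state (i, dist_from_last, categDist)
def pvLoopA (SL : List Bool) (c : Bool) : Nat → Nat → Int → List Int → List Int
  | 0, _, _, acc => acc
  | fuel + 1, i, dist, acc =>
      let dist' : Int := if (SL.getD i false == c) = true then 1 else dist + 1
      pvLoopA SL c fuel (i + 1) dist' (acc ++ [dist'])

def calc_category_dist_py (SL : List Bool) (category : Bool) : List Int :=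
  match pvFirstA (SL.drop 1) category 1 with
  | none => []   -- Python raises StopIteration here (outside Pre_)
  | some i => pvLoopA SL category ((SL.length - 1) - i) i 0 (-1 :: List.replicate i 0)

-- ===== PORT B =====
-- [k for k, x in enumerate(SL) if k >= 1 and x == category]
def pvPredB (SL : List Bool) (c : Bool) (k : Nat) : Bool :=
  decide (1 ≤ k) && (SL.getD k false == c)

def pvOcc (SL : List Bool) (c : Bool) : List Nat :=
  (List.range SL.length).filter (pvPredB SL c)

-- while p + 1 < len(occ) and occ[p + 1] < k: p += 1   (fuel = len(occ) bounds the walk)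
def pvAdvance (occ : List Nat) (k : Nat) : Nat → Nat → Nat
  | 0, p => p
  | fuel + 1, p =>
      if p + 1 < occ.length ∧ occ.getD (p + 1) 0 < k then pvAdvance occ k fuel (p + 1) else p

-- for k in range(first + 1, len(SL)): …  fuel = len(SL) - (first+1)
def pvLoopB (occ : List Nat) : Nat → Nat → Nat → List Int → List Int
  | 0, _, _, acc => acc
  | fuel + 1, k, p, acc =>
      let p' := pvAdvance occ k occ.length p
      pvLoopB occ fuel (k + 1) p' (acc ++ [(k : Int) - (occ.getD p' 0 : Int)])

def calc_category_dist_py_alt (SL : List Bool) (category : Bool) : List Int :=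
  match pvOcc SL category with
  | [] => []   -- next(iter(occ)) raises StopIteration here (outside Pre_)
  | first :: _ =>
      pvLoopB (pvOcc SL category) (SL.length - (first + 1)) (first + 1) 0
        (-1 :: List.replicate first 0)

-- ===== PRECONDITION & SPEC =====
-- Pre_ excludes exactly the inputs where the category never occurs in SL[1:], on which A raises StopIteration.
def Pre_calc_category_dist_py (SL : List Bool) (category : Bool) : Prop :=
  category ∈ SL.drop 1
instance (SL : List Bool) (category : Bool) : Decidable (Pre_calc_category_dist_py SL category) := by
  unfold Pre_calc_category_dist_py; infer_instance

def pvWitness_calc_category_dist_py : List Bool × Bool := ([false, true, false, true, false], true)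

def Spec_calc_category_dist_py (SL : List Bool) (category : Bool) (out : List Int) : Prop :=
  out = calc_category_dist_py_alt SL category
instance (SL : List Bool) (category : Bool) (out : List Int) : Decidable (Spec_calc_category_dist_py SL category out) := by
  unfold Spec_calc_category_dist_py; infer_instance

-- ===== CLAIM (what is proved, stated in full; the proofs are below) =====
def Claim_equal_calc_category_dist_py : Prop :=
  ∀ (SL : List Bool) (category : Bool), Dom_calc_category_dist_py SL category →
    Pre_calc_category_dist_py SL category →
    Spec_calc_category_dist_py SL category (calc_category_dist_py SL category)

-- ===== LEMMAS AND PROOFS =====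

-- last occurrence index strictly below k (proof-side reference; junk 0 when none exists)
def lastBelow (SL : List Bool) (c : Bool) : Nat → Nat
  | 0 => 0
  | k + 1 => if pvPredB SL c k then k else lastBelow SL c k

def pvDistF (SL : List Bool) (c : Bool) (k : Nat) : Int :=
  (k : Int) - (lastBelow SL c k : Nat)

theorem lastBelow_succ_pos (SL : List Bool) (c : Bool) (k : Nat)
    (h : pvPredB SL c k = true) : lastBelow SL c (k + 1) = k := by
  simp [lastBelow, h]

theorem lastBelow_succ_neg (SL : List Bool) (c : Bool) (k : Nat)
    (h : pvPredB SL c k = false) : lastBelow SL c (k + 1) = lastBelow SL c k := by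
  simp [lastBelow, h]

theorem lastBelow_le (SL : List Bool) (c : Bool) (k : Nat) : lastBelow SL c k ≤ k := by
  induction k with
  | zero => simp [lastBelow]
  | succ k ih =>
    by_cases h : pvPredB SL c k = true
    · rw [lastBelow_succ_pos SL c k h]; omega
    · rw [lastBelow_succ_neg SL c k (by simpa using h)]; omega

theorem lastBelow_max (SL : List Bool) (c : Bool) (k j : Nat)
    (hj : pvPredB SL c j = true) (hjk : j < k) :
    pvPredB SL c (lastBelow SL c k) = true ∧ j ≤ lastBelow SL c k ∧ lastBelow SL c k < k := by
  induction k with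
  | zero => omega
  | succ k ih =>
    by_cases h : pvPredB SL c k = true
    · rw [lastBelow_succ_pos SL c k h]
      exact ⟨h, by omega, by omega⟩
    · have hf : pvPredB SL c k = false := by simpa using h
      have hj' : j < k := by
        rcases Nat.lt_succ_iff_lt_or_eq.mp hjk with h' | h'
        · exact h'
        · subst h'; exact absurd hj h
      have := ih hj'
      rw [lastBelow_succ_neg SL c k hf]
      exact ⟨this.1, this.2.1, by omega⟩

theorem occ_pairwise (SL : List Bool) (c : Bool) : (pvOcc SL c).Pairwise (· < ·) :=
  (List.pairwise_lt_range).filter _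

theorem mem_occ (SL : List Bool) (c : Bool) (j : Nat) :
    j ∈ pvOcc SL c ↔ j < SL.length ∧ pvPredB SL c j = true := by
  simp [pvOcc, List.mem_filter, List.mem_range]

theorem pv_and_split {a b : Bool} (h : (a && b) = true) : a = true ∧ b = true := by
  cases a <;> cases b <;> simp_all

-- ----- A's loop computes k ↦ k - lastBelow k -----
theorem loopA_eq (SL : List Bool) (c : Bool) (fuel : Nat) :
    ∀ (i : Nat) (dist : Int) (acc : List Int), 1 ≤ i →
    ((SL.getD i false == c) = true ∨ dist = (i : Int) - (lastBelow SL c i : Nat)) →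
    pvLoopA SL c fuel i dist acc =
      acc ++ (List.range' (i + 1) fuel).map (pvDistF SL c) := by
  induction fuel with
  | zero => intro i dist acc _ _; simp [pvLoopA]
  | succ fuel ih =>
    intro i dist acc hi hinv
    have hstep : (if (SL.getD i false == c) = true then (1 : Int) else dist + 1)
        = pvDistF SL c (i + 1) := by
      unfold pvDistF
      by_cases h : (SL.getD i false == c) = true
      · have hp : pvPredB SL c i = true := by
          unfold pvPredB
          rw [h, Bool.and_true, decide_eq_true_iff]
          omega
        rw [if_pos h, lastBelow_succ_pos SL c i hp]
        push_cast; ring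
      · have hp : pvPredB SL c i = false := by
          unfold pvPredB
          rw [Bool.eq_false_iff]
          intro hcon
          exact h (pv_and_split hcon).2
        rcases hinv with h' | h'
        · exact absurd h' h
        · have hlt : lastBelow SL c i ≤ i := lastBelow_le SL c i
          rw [if_neg h, lastBelow_succ_neg SL c i hp, h']
          push_cast; ring
    show pvLoopA SL c (fuel + 1) i dist acc = _
    have hun : pvLoopA SL c (fuel + 1) i dist acc =
        pvLoopA SL c fuel (i + 1) (if (SL.getD i false == c) = true then 1 else dist + 1)
          (acc ++ [if (SL.getD i false == c) = true then 1 else dist + 1]) := rfl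
    rw [hun, hstep]
    rw [ih (i + 1) (pvDistF SL c (i + 1)) (acc ++ [pvDistF SL c (i + 1)]) (by omega) (Or.inr rfl)]
    rw [List.range'_succ, List.map_cons, List.append_assoc]
    rfl

-- ----- the pointer walk lands on the last table entry < k -----
theorem advance_post (L : List Nat) (k : Nat) (fuel : Nat) :
    ∀ p, p < L.length → L.length - 1 - p ≤ fuel →
      p ≤ pvAdvance L k fuel p ∧ pvAdvance L k fuel p < L.length ∧
      (L.getD (pvAdvance L k fuel p) 0 < k ∨ pvAdvance L k fuel p = p) ∧
      (pvAdvance L k fuel p + 1 < L.length → ¬ L.getD (pvAdvance L k fuel p + 1) 0 < k) := by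
  induction fuel with
  | zero =>
    intro p hp hf
    have h0 : pvAdvance L k 0 p = p := rfl
    rw [h0]
    exact ⟨Nat.le_refl _, hp, Or.inr rfl, fun h => absurd h (by omega)⟩
  | succ fuel ih =>
    intro p hp hf
    have hun : pvAdvance L k (fuel + 1) p =
        if p + 1 < L.length ∧ L.getD (p + 1) 0 < k then pvAdvance L k fuel (p + 1) else p := rfl
    by_cases hc : p + 1 < L.length ∧ L.getD (p + 1) 0 < k
    · rw [hun, if_pos hc]
      have := ih (p + 1) hc.1 (by omega)
      refine ⟨by omega, this.2.1, ?_, this.2.2.2⟩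
      rcases this.2.2.1 with h | h
      · exact Or.inl h
      · rw [h]; exact Or.inl hc.2
    · rw [hun, if_neg hc]
      refine ⟨Nat.le_refl _, hp, Or.inr rfl, fun h1 h2 => hc ⟨h1, h2⟩⟩

theorem occ_getD_lt (SL : List Bool) (c : Bool) (p q : Nat)
    (hp : p < (pvOcc SL c).length) (hq : q < (pvOcc SL c).length) (hpq : p < q) :
    (pvOcc SL c).getD p 0 < (pvOcc SL c).getD q 0 := by
  have := (List.pairwise_iff_getElem.mp (occ_pairwise SL c)) p q hp hq hpq
  rwa [List.getD_eq_getElem _ _ hp, List.getD_eq_getElem _ _ hq]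

theorem advance_eq_lastBelow (SL : List Bool) (c : Bool) (k p : Nat)
    (hk : k ≤ SL.length) (hp : p < (pvOcc SL c).length)
    (hpk : (pvOcc SL c).getD p 0 < k) :
    (pvOcc SL c).getD (pvAdvance (pvOcc SL c) k (pvOcc SL c).length p) 0 = lastBelow SL c k ∧
    pvAdvance (pvOcc SL c) k (pvOcc SL c).length p < (pvOcc SL c).length := by
  obtain ⟨hle, hp', hlt, hnext⟩ :=
    advance_post (pvOcc SL c) k (pvOcc SL c).length p hp (by omega)
  have hvlt : (pvOcc SL c).getD (pvAdvance (pvOcc SL c) k (pvOcc SL c).length p) 0 < k := by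
    rcases hlt with h | h
    · exact h
    · rw [h]; exact hpk
  have hvmem : (pvOcc SL c).getD (pvAdvance (pvOcc SL c) k (pvOcc SL c).length p) 0 ∈ pvOcc SL c := by
    rw [List.getD_eq_getElem _ _ hp']; exact List.getElem_mem _
  have hvocc := (mem_occ SL c _).mp hvmem
  obtain ⟨hpredLB, hvle, hLBlt⟩ := lastBelow_max SL c k _ hvocc.2 hvlt
  have hLBmem : lastBelow SL c k ∈ pvOcc SL c := by
    rw [mem_occ]; exact ⟨by omega, hpredLB⟩
  obtain ⟨q, hq, hqv⟩ := List.mem_iff_getElem.mp hLBmem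
  have hqD : (pvOcc SL c).getD q 0 = lastBelow SL c k := by
    rw [List.getD_eq_getElem _ _ hq]; exact hqv
  refine ⟨?_, hp'⟩
  rcases Nat.lt_trichotomy q (pvAdvance (pvOcc SL c) k (pvOcc SL c).length p) with h | h | h
  · have := occ_getD_lt SL c q _ hq hp' h
    omega
  · rw [← h, hqD]
  · -- q > p': then occ[p'+1] ≤ occ[q] = lastBelow k < k, contradicting advance_post
    exfalso
    have h1 : pvAdvance (pvOcc SL c) k (pvOcc SL c).length p + 1 < (pvOcc SL c).length := by omega
    have h2 : (pvOcc SL c).getD (pvAdvance (pvOcc SL c) k (pvOcc SL c).length p + 1) 0 < k := by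
      rcases Nat.lt_or_ge (pvAdvance (pvOcc SL c) k (pvOcc SL c).length p + 1) q with h' | h'
      · have := occ_getD_lt SL c _ q h1 hq h'
        omega
      · have heq : pvAdvance (pvOcc SL c) k (pvOcc SL c).length p + 1 = q := by omega
        rw [heq, hqD]; omega
    exact hnext h1 h2

-- ----- B's loop computes the same map -----
theorem loopB_eq (SL : List Bool) (c : Bool) (fuel : Nat) :
    ∀ (k p : Nat) (acc : List Int), k + fuel ≤ SL.length →
    p < (pvOcc SL c).length → (pvOcc SL c).getD p 0 < k →
    pvLoopB (pvOcc SL c) fuel k p acc =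
      acc ++ (List.range' k fuel).map (pvDistF SL c) := by
  induction fuel with
  | zero => intro k p acc _ _ _; simp [pvLoopB]
  | succ fuel ih =>
    intro k p acc hkf hp hpk
    obtain ⟨hval, hp'⟩ := advance_eq_lastBelow SL c k p (by omega) hp hpk
    have hmem2 : (pvOcc SL c).getD p 0 ∈ pvOcc SL c := by
      rw [List.getD_eq_getElem _ _ hp]; exact List.getElem_mem _
    have hLBlt : lastBelow SL c k < k :=
      (lastBelow_max SL c k _ ((mem_occ SL c _).mp hmem2).2 hpk).2.2
    have helt : ((k : Int) -
        ((pvOcc SL c).getD (pvAdvance (pvOcc SL c) k (pvOcc SL c).length p) 0 : Nat))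
        = pvDistF SL c k := by
      rw [hval]; rfl
    have hun : pvLoopB (pvOcc SL c) (fuel + 1) k p acc =
        pvLoopB (pvOcc SL c) fuel (k + 1) (pvAdvance (pvOcc SL c) k (pvOcc SL c).length p)
          (acc ++ [(k : Int) -
            ((pvOcc SL c).getD (pvAdvance (pvOcc SL c) k (pvOcc SL c).length p) 0 : Nat)]) := rfl
    rw [hun, helt]
    rw [ih (k + 1) _ _ (by omega) hp' (by rw [hval]; omega)]
    rw [List.range'_succ, List.map_cons, List.append_assoc]
    rfl

-- ----- the first-occurrence search agrees with occ.head? -----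
theorem firstA_some (c : Bool) (l : List Bool) :
    ∀ (s i : Nat), pvFirstA l c s = some i →
      s ≤ i ∧ l[i - s]? = some c ∧ ∀ t, t < i - s → l[t]? ≠ some c := by
  induction l with
  | nil => intro s i h; simp [pvFirstA] at h
  | cons x xs ih =>
    intro s i h
    by_cases hx : (x == c) = true
    · simp [pvFirstA, hx] at h
      subst h
      refine ⟨le_refl _, ?_, fun t ht => by omega⟩
      simp [beq_iff_eq.mp hx]
    · simp only [pvFirstA, hx, Bool.false_eq_true, if_false] at h
      obtain ⟨h1, h2, h3⟩ := ih (s + 1) i h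
      refine ⟨by omega, ?_, ?_⟩
      · have : i - s = (i - (s + 1)) + 1 := by omega
        rw [this]; simpa using h2
      · intro t ht
        cases t with
        | zero =>
          simp
          intro hxc; exact hx (beq_iff_eq.mpr hxc)
        | succ t =>
          simp only [List.getElem?_cons_succ]
          exact h3 t (by omega)

theorem firstA_none (c : Bool) (l : List Bool) :
    ∀ (s : Nat), pvFirstA l c s = none → ∀ t : Nat, l[t]? ≠ some c := by
  induction l with
  | nil => intro s _ t; simp
  | cons x xs ih =>
    intro s h t
    by_cases hx : (x == c) = true
    · simp [pvFirstA, hx] at h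
    · simp only [pvFirstA, hx, Bool.false_eq_true, if_false] at h
      cases t with
      | zero => simp; intro hxc; exact hx (beq_iff_eq.mpr hxc)
      | succ t => simpa using ih (s + 1) h t

theorem head?_of_min {l : List Nat} (x : Nat) (hs : l.Pairwise (· < ·))
    (hx : x ∈ l) (hmin : ∀ y ∈ l, x ≤ y) : l.head? = some x := by
  cases l with
  | nil => simp at hx
  | cons a t =>
    have hxa : x ≤ a := hmin a (by simp)
    rcases List.mem_cons.mp hx with h | h
    · simp [h]
    · have : a < x := (List.pairwise_cons.mp hs).1 x h
      omega

theorem getD_getElem? (SL : List Bool) (j : Nat) (hj : j < SL.length) :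
    SL[j]? = some (SL.getD j false) := by
  rw [List.getD_eq_getElem _ _ hj, List.getElem?_eq_getElem hj]

theorem firstA_head (SL : List Bool) (c : Bool) :
    pvFirstA (SL.drop 1) c 1 = (pvOcc SL c).head? := by
  cases hA : pvFirstA (SL.drop 1) c 1 with
  | none =>
    have hnone := firstA_none c (SL.drop 1) 1 hA
    symm
    rw [List.head?_eq_none_iff, List.eq_nil_iff_forall_not_mem]
    intro j hj
    obtain ⟨hjn, hjp⟩ := (mem_occ SL c j).mp hj
    have h1 : 1 ≤ j := by simpa [pvPredB] using (pv_and_split hjp).1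
    have h2 : (SL.getD j false == c) = true := (pv_and_split hjp).2
    have : SL[j]? = some c := by
      rw [getD_getElem? SL j hjn, beq_iff_eq.mp h2]
    have hdrop : (SL.drop 1)[j - 1]? = some c := by
      rw [List.getElem?_drop]
      have : 1 + (j - 1) = j := by omega
      rw [this]; exact ‹SL[j]? = some c›
    exact hnone (j - 1) hdrop
  | some i =>
    obtain ⟨h1, h2, h3⟩ := firstA_some c (SL.drop 1) 1 i hA
    rw [List.getElem?_drop] at h2
    have hi : SL[1 + (i - 1)]? = some c := h2
    have hii : 1 + (i - 1) = i := by omega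
    rw [hii] at hi
    have hin : i < SL.length := by
      rcases Nat.lt_or_ge i SL.length with h | h
      · exact h
      · rw [List.getElem?_eq_none h] at hi; simp at hi
    have higet : SL.getD i false = c := by
      rw [getD_getElem? SL i hin] at hi
      exact Option.some.inj hi
    symm
    apply head?_of_min i (occ_pairwise SL c)
    · rw [mem_occ]
      refine ⟨hin, ?_⟩
      simp only [pvPredB, Bool.and_eq_true, decide_eq_true_eq, beq_iff_eq]
      exact ⟨h1, higet⟩
    · intro y hy
      obtain ⟨hyn, hyp⟩ := (mem_occ SL c y).mp hy
      have hy1 : 1 ≤ y := by simpa [pvPredB] using (pv_and_split hyp).1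
      have hy2 : SL.getD y false = c := beq_iff_eq.mp (pv_and_split hyp).2
      rcases Nat.lt_or_ge y i with hcon | hcon
      · exfalso
        have hdr : (SL.drop 1)[y - 1]? = some c := by
          rw [List.getElem?_drop]
          have hyy : 1 + (y - 1) = y := by omega
          rw [hyy, getD_getElem? SL y hyn, hy2]
        exact h3 (y - 1) (by omega) hdr
      · exact hcon

-- ===== VERDICT (by name: the statement is the Claim_ definition above) =====
theorem calc_category_dist_py_spec : Claim_equal_calc_category_dist_py := by
  intro SL category _ hpre
  unfold Spec_calc_category_dist_py
  unfold Pre_calc_category_dist_py at hpre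
  -- Pre_ gives an occurrence, so pvFirstA returns some i
  cases hA : pvFirstA (SL.drop 1) category 1 with
  | none =>
    exfalso
    obtain ⟨t, ht, hval⟩ := List.mem_iff_getElem.mp hpre
    exact firstA_none category (SL.drop 1) 1 hA t
      (by rw [List.getElem?_eq_getElem ht, hval])
  | some i =>
    have hhead : (pvOcc SL category).head? = some i := (firstA_head SL category).symm.trans hA
    obtain ⟨tail, hocc⟩ : ∃ t, pvOcc SL category = i :: t := by
      cases h : pvOcc SL category with
      | nil => rw [h] at hhead; simp at hhead
      | cons a t => rw [h] at hhead; simp at hhead; exact ⟨t, by rw [hhead]⟩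
    have himem : i ∈ pvOcc SL category := by rw [hocc]; simp
    obtain ⟨hin, hip⟩ := (mem_occ SL category i).mp himem
    have hi1 : 1 ≤ i := by simpa using (pv_and_split hip).1
    have hieq : (SL.getD i false == category) = true := (pv_and_split hip).2
    have hAeq : calc_category_dist_py SL category =
        pvLoopA SL category ((SL.length - 1) - i) i 0 (-1 :: List.replicate i 0) := by
      unfold calc_category_dist_py
      rw [hA]
    have hBeq : calc_category_dist_py_alt SL category =
        pvLoopB (pvOcc SL category) (SL.length - (i + 1)) (i + 1) 0
          (-1 :: List.replicate i 0) := by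
      unfold calc_category_dist_py_alt
      rw [hocc]
    rw [hAeq, hBeq]
    rw [loopA_eq SL category _ i 0 _ hi1 (Or.inl hieq)]
    rw [loopB_eq SL category _ (i + 1) 0 _ (by omega) (by rw [hocc]; simp)
        (by rw [hocc]; simp)]
    have hfuel : SL.length - 1 - i = SL.length - (i + 1) := by omega
    rw [hfuel]
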